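-- pv_equiv track=rewrite | github.com/nahidalam/VLMEvalKit | scripts/spatial_coherence.py | compute_distant_patches
-- ===== SOURCE A (Python) =====
-- from typing import Dict, List, Tuple
--
-- def compute_distant_patches(patch_idx: int, H: int, W: int, min_distance: int = 5) -> List[int]:
--     """Get indices of distant patches (at least min_distance away in grid)."""
--     row = patch_idx // W
--     col = patch_idx % W
--
--     distant = []
--     for r in range(H):
--         for c in range(W):
--             if abs(r - row) >= min_distance or abs(c - col) >= min_distance:
--                 distant.append(r * W + c)
--
--     return distant
-- ===== SOURCE B (Python) =====
-- def compute_distant_patches(patch_idx: int, H: int, W: int, min_distance: int = 5):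
--     """Get indices of distant patches (at least min_distance away in grid)."""
--     if H <= 0 or W <= 0:
--         return []
--     row, col = divmod(patch_idx, W)
--     near = set()
--     for r in range(max(0, row - min_distance + 1), min(H, row + min_distance)):
--         for c in range(max(0, col - min_distance + 1), min(W, col + min_distance)):
--             near.add(r * W + c)
--     return [i for i in range(H * W) if i not in near]
-- ===== Notes on version B (the rewrite author's own statement) =====
-- stated objective: alternative
-- what changed: Instead of testing an arithmetic distance predicate per cell in a nested H-by-W loop, B first builds the small clipped 'near' rectangle as a set in a bounded (at most (2d-1)^2) double loop, then emits every flat index of range(H*W) not in that set.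
import Mathlib
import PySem

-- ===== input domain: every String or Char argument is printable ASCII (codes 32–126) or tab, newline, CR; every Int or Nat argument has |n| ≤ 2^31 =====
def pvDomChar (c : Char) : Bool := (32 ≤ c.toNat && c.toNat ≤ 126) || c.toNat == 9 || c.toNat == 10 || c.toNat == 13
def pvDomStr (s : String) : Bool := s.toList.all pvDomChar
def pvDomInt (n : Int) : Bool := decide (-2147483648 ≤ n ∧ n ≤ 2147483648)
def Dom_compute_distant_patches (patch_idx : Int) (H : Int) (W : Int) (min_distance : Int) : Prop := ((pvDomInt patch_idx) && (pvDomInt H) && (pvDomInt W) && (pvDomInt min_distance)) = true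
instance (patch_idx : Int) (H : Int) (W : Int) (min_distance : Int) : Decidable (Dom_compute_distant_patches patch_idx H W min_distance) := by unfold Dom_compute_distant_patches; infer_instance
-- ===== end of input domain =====

-- B builds the small clipped "near" rectangle as a set first, then emits every flat index
-- of range(H*W) not in it — a different decomposition of the same result (objective: alternative).

-- ===== PORT A =====
def compute_distant_patches (patch_idx : Int) (H : Int) (W : Int) (min_distance : Int) : List Int :=
  let row := PySem.Int.floordiv patch_idx W
  let col := PySem.Int.mod patch_idx W
  (PySem.List.pyRange 0 H 1).foldl (fun distant r =>
    (PySem.List.pyRange 0 W 1).foldl (fun distant c =>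
      if min_distance ≤ |r - row| ∨ min_distance ≤ |c - col| then distant ++ [r * W + c]
      else distant) distant) []

-- ===== PORT B =====
def compute_distant_patches_alt (patch_idx : Int) (H : Int) (W : Int) (min_distance : Int) : List Int :=
  if H ≤ 0 ∨ W ≤ 0 then []
  else
    let row := PySem.Int.floordiv patch_idx W
    let col := PySem.Int.mod patch_idx W
    let near : PySem.Set Int :=
      (PySem.List.pyRange (max 0 (row - min_distance + 1)) (min H (row + min_distance)) 1).foldl
        (fun s r =>
          (PySem.List.pyRange (max 0 (col - min_distance + 1)) (min W (col + min_distance)) 1).foldl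
            (fun s c => PySem.Set.add s (r * W + c)) s)
        PySem.Set.empty
    (PySem.List.pyRange 0 (H * W) 1).filter (fun i => !(PySem.Set.contains near i))

-- ===== PRECONDITION & SPEC =====
-- Pre_ excludes only W = 0, where A raises ZeroDivisionError at patch_idx // W.
def Pre_compute_distant_patches (patch_idx : Int) (H : Int) (W : Int) (min_distance : Int) : Prop := W ≠ 0
instance (patch_idx : Int) (H : Int) (W : Int) (min_distance : Int) : Decidable (Pre_compute_distant_patches patch_idx H W min_distance) := by unfold Pre_compute_distant_patches; infer_instance
def pvWitness_compute_distant_patches : Int × Int × Int × Int := (0, 3, 3, 1)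

def Spec_compute_distant_patches (patch_idx : Int) (H : Int) (W : Int) (min_distance : Int) (out : List Int) : Prop := out = compute_distant_patches_alt patch_idx H W min_distance
instance (patch_idx : Int) (H : Int) (W : Int) (min_distance : Int) (out : List Int) : Decidable (Spec_compute_distant_patches patch_idx H W min_distance out) := by unfold Spec_compute_distant_patches; infer_instance

-- ===== CLAIM (what is proved, stated in full; the proofs are below) =====
def Claim_equal_compute_distant_patches : Prop := ∀ (patch_idx : Int) (H : Int) (W : Int) (min_distance : Int), Dom_compute_distant_patches patch_idx H W min_distance → Pre_compute_distant_patches patch_idx H W min_distance → Spec_compute_distant_patches patch_idx H W min_distance (compute_distant_patches patch_idx H W min_distance)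
-- ===== LEMMAS AND PROOFS =====

-- generic: a loop that conditionally appends is a filter + map
theorem foldl_if_append (l : List Int) (p : Int → Prop) [DecidablePred p] (f : Int → Int) :
    ∀ (acc : List Int),
      l.foldl (fun acc x => if p x then acc ++ [f x] else acc) acc
        = acc ++ (l.filter (fun x => decide (p x))).map f := by
  induction l with
  | nil => intro acc; simp
  | cons h t ih =>
    intro acc
    by_cases hp : p h <;> simp [List.foldl_cons, ih, hp]

-- generic: a loop that appends a block per element is a flatMap
theorem foldl_append_blocks (l : List Int) (g : Int → List Int) :
    ∀ (acc : List Int), l.foldl (fun acc x => acc ++ g x) acc = acc ++ l.flatMap g := by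
  induction l with
  | nil => intro acc; simp
  | cons h t ih => intro acc; simp [List.foldl_cons, ih]

-- membership in a set built by a loop of adds
theorem mem_set_foldl_add (l : List Int) (f : Int → Int) :
    ∀ (s : PySem.Set Int) (x : Int),
      (x ∈ l.foldl (fun s c => PySem.Set.add s (f c)) s) ↔ x ∈ s ∨ ∃ c ∈ l, f c = x := by
  induction l with
  | nil => intro s x; simp
  | cons h t ih =>
    intro s x
    rw [List.foldl_cons, ih, PySem.Set.mem_add]
    constructor
    · rintro ((hs | he) | ⟨c, hc, hf⟩)
      · exact Or.inl hs
      · exact Or.inr ⟨h, by simp, he.symm⟩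
      · exact Or.inr ⟨c, by simp [hc], hf⟩
    · rintro (hs | ⟨c, hc, hf⟩)
      · exact Or.inl (Or.inl hs)
      · rcases List.mem_cons.mp hc with rfl | hc
        · exact Or.inl (Or.inr hf.symm)
        · exact Or.inr ⟨c, hc, hf⟩

-- membership in the nested near-set loop
theorem mem_set_foldl_add2 (lr lc : List Int) (W : Int) :
    ∀ (s : PySem.Set Int) (x : Int),
      (x ∈ lr.foldl (fun s r => lc.foldl (fun s c => PySem.Set.add s (r * W + c)) s) s) ↔
        x ∈ s ∨ ∃ r ∈ lr, ∃ c ∈ lc, r * W + c = x := by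
  induction lr with
  | nil => intro s x; simp
  | cons h t ih =>
    intro s x
    rw [List.foldl_cons, ih, mem_set_foldl_add]
    constructor
    · rintro ((hs | ⟨c, hc, hf⟩) | ⟨r, hr, hrest⟩)
      · exact Or.inl hs
      · exact Or.inr ⟨h, by simp, c, hc, hf⟩
      · exact Or.inr ⟨r, by simp [hr], hrest⟩
    · rintro (hs | ⟨r, hr, hrest⟩)
      · exact Or.inl (Or.inl hs)
      · rcases List.mem_cons.mp hr with rfl | hr
        · exact Or.inl (Or.inr hrest)
        · exact Or.inr ⟨r, hr, hrest⟩

-- floordiv/mod of a flat index inside one row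
theorem floordiv_row (n k W : Int) (hW : 0 < W) (h0 : 0 ≤ k) (h1 : k < W) :
    PySem.Int.floordiv (n * W + k) W = n := by
  rw [PySem.Int.floordiv_eq_iff_of_pos hW]
  constructor <;> nlinarith

theorem mod_row (n k W : Int) (hW : 0 < W) (h0 : 0 ≤ k) (h1 : k < W) :
    PySem.Int.mod (n * W + k) W = k := by
  have := PySem.Int.floordiv_mul_add_mod (n * W + k) W
  rw [floordiv_row n k W hW h0 h1] at this
  omega

-- map of a filter is congruent under pointwise agreement on members
theorem map_filter_congr {a b : Type} (l : List a) (p q : a → Bool) (f g : a → b)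
    (h : ∀ x ∈ l, p x = q x ∧ f x = g x) :
    (l.filter p).map f = (l.filter q).map g := by
  induction l with
  | nil => rfl
  | cons x t ih =>
    have hx := h x (by simp)
    have ht : ∀ y ∈ t, p y = q y ∧ f y = g y := fun y hy => h y (by simp [hy])
    by_cases hp : p x = true
    · rw [List.filter_cons_of_pos hp, List.filter_cons_of_pos (hx.1 ▸ hp),
        List.map_cons, List.map_cons, hx.2, ih ht]
    · rw [List.filter_cons_of_neg hp, List.filter_cons_of_neg (hx.1 ▸ hp), ih ht]

-- one row's filtered block, re-indexed as a block of the flat range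
theorem block_eq (W row col m n : Int) (hW : 0 < W) :
    ((PySem.List.pyRange 0 W 1).filter
        (fun c => decide (m ≤ |n - row| ∨ m ≤ |c - col|))).map (fun c => n * W + c)
      = (PySem.List.pyRange (n * W) (n * W + W) 1).filter
          (fun i => decide (m ≤ |PySem.Int.floordiv i W - row| ∨ m ≤ |PySem.Int.mod i W - col|)) := by
  rw [PySem.List.pyRange_one 0 W, PySem.List.pyRange_one (n * W) (n * W + W)]
  have e1 : (n * W + W - n * W).toNat = (W - 0).toNat := by congr 1; ring
  rw [e1, List.filter_map, List.filter_map, List.map_map]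
  refine map_filter_congr _ _ _ _ _ (fun k hk => ?_)
  have hkW : (k : Int) < W := by
    have := List.mem_range.mp hk
    omega
  have hk0 : (0 : Int) ≤ (k : Int) := Int.natCast_nonneg k
  constructor
  · simp only [Function.comp]
    rw [floordiv_row n (k : Int) W hW hk0 hkW, mod_row n (k : Int) W hW hk0 hkW]
    simp
  · simp only [Function.comp]
    ring_nf

-- the flatMap of per-row filtered blocks is one flat filtered range
theorem flat_eq_filter (W row col m : Int) (hW : 0 < W) :
    ∀ (n : Nat),
      (PySem.List.pyRange 0 (n : Int) 1).flatMap
        (fun r => ((PySem.List.pyRange 0 W 1).filter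
            (fun c => decide (m ≤ |r - row| ∨ m ≤ |c - col|))).map (fun c => r * W + c))
      = (PySem.List.pyRange 0 ((n : Int) * W) 1).filter
          (fun i => decide (m ≤ |PySem.Int.floordiv i W - row| ∨ m ≤ |PySem.Int.mod i W - col|)) := by
  intro n
  induction n with
  | zero => simp [PySem.List.pyRange_one_eq_nil]
  | succ n ih =>
    have hnn : (0 : Int) ≤ (n : Int) := Int.natCast_nonneg n
    have hrow : PySem.List.pyRange 0 ((n : Int) + 1) 1
        = PySem.List.pyRange 0 (n : Int) 1 ++ [(n : Int)] := PySem.List.pyRange_one_succ_right hnn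
    have hsplit : PySem.List.pyRange 0 (((n : Int) + 1) * W) 1
        = PySem.List.pyRange 0 ((n : Int) * W) 1 ++ PySem.List.pyRange ((n : Int) * W) (((n : Int) + 1) * W) 1 :=
      PySem.List.pyRange_one_append 0 ((n : Int) * W) (((n : Int) + 1) * W)
        (by nlinarith) (by nlinarith)
    have hend : ((n : Int) + 1) * W = (n : Int) * W + W := by ring
    push_cast
    rw [hrow, hsplit, List.flatMap_append, List.filter_append, ih]
    congr 1
    rw [List.flatMap_cons, List.flatMap_nil, List.append_nil, hend]
    exact block_eq W row col m (n : Int) hW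

theorem foldl_fixed_nil (l : List Int) :
    l.foldl (fun (d : List Int) (_ : Int) => d) ([] : List Int) = [] := by
  induction l with
  | nil => rfl
  | cons h t ih => simpa [List.foldl_cons] using ih

-- the two filter predicates agree on in-grid flat indices
theorem pred_agree (patch_idx H W m i : Int) (hW : 0 < W) (hi0 : 0 ≤ i) (hiHW : i < H * W) :
    (!(PySem.Set.contains
        ((PySem.List.pyRange (max 0 (PySem.Int.floordiv patch_idx W - m + 1)) (min H (PySem.Int.floordiv patch_idx W + m)) 1).foldl
          (fun s r =>
            (PySem.List.pyRange (max 0 (PySem.Int.mod patch_idx W - m + 1)) (min W (PySem.Int.mod patch_idx W + m)) 1).foldl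
              (fun s c => PySem.Set.add s (r * W + c)) s)
          PySem.Set.empty) i))
      = decide (m ≤ |PySem.Int.floordiv i W - PySem.Int.floordiv patch_idx W| ∨
                m ≤ |PySem.Int.mod i W - PySem.Int.mod patch_idx W|) := by
  set row := PySem.Int.floordiv patch_idx W with hrow
  set col := PySem.Int.mod patch_idx W with hcol
  set r := PySem.Int.floordiv i W with hr
  set c := PySem.Int.mod i W with hc
  set near := ((PySem.List.pyRange (max 0 (row - m + 1)) (min H (row + m)) 1).foldl
      (fun s r =>
        (PySem.List.pyRange (max 0 (col - m + 1)) (min W (col + m)) 1).foldl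
          (fun s c => PySem.Set.add s (r * W + c)) s)
      PySem.Set.empty) with hnear_def
  have hc0 : 0 ≤ c := PySem.Int.mod_nonneg _ hW
  have hcW : c < W := PySem.Int.mod_lt _ hW
  have hieq : r * W + c = i := by
    have := PySem.Int.floordiv_mul_add_mod i W
    omega
  have hr0 : 0 ≤ r := by
    by_contra hneg
    push_neg at hneg
    nlinarith
  have hrH : r < H := by
    by_contra hge
    push_neg at hge
    nlinarith
  have hmem : (i ∈ near) ↔ (|r - row| < m ∧ |c - col| < m) := by
    rw [hnear_def, mem_set_foldl_add2]
    constructor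
    · rintro (habs | ⟨r', hr', c', hc', heq⟩)
      · simp [PySem.Set.empty] at habs
      · rw [PySem.List.mem_pyRange_one] at hr' hc'
        have hc'0 : 0 ≤ c' := by omega
        have hc'W : c' < W := by omega
        have : r' = r := by
          have : PySem.Int.floordiv i W = r' := by
            rw [← heq]; exact floordiv_row r' c' W hW hc'0 hc'W
          omega
        subst this
        have : c' = c := by
          have : PySem.Int.mod i W = c' := by
            rw [← heq]; exact mod_row r c' W hW hc'0 hc'W
          omega
        subst this
        rw [abs_sub_lt_iff, abs_sub_lt_iff]
        omega
    · rintro ⟨h1, h2⟩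
      rw [abs_sub_lt_iff] at h1 h2
      refine Or.inr ⟨r, ?_, c, ?_, hieq⟩
      · rw [PySem.List.mem_pyRange_one]; omega
      · rw [PySem.List.mem_pyRange_one]; omega
  rcases Bool.eq_false_or_eq_true (PySem.Set.contains near i) with hb | hb <;> rw [hb]
  · -- i in near: the distance condition fails
    have hmem' := hmem.mp ((PySem.Set.contains_iff near i).mp hb)
    have hno : ¬ (m ≤ |r - row| ∨ m ≤ |c - col|) := by
      rintro (h | h)
      · exact absurd h (not_le.mpr hmem'.1)
      · exact absurd h (not_le.mpr hmem'.2)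
    simp [hno]
  · -- i not in near: the distance condition holds
    have hnotmem : i ∉ near := fun hx =>
      Bool.noConfusion (((PySem.Set.contains_iff near i).mpr hx).symm.trans hb)
    have hyes : m ≤ |r - row| ∨ m ≤ |c - col| := by
      by_contra hcon
      push_neg at hcon
      exact hnotmem (hmem.mpr ⟨hcon.1, hcon.2⟩)
    simp [hyes]

-- ===== VERDICT (by name: the statement is the Claim_ definition above) =====
theorem compute_distant_patches_spec : Claim_equal_compute_distant_patches := by
  intro patch_idx H W m _ hpre
  unfold Pre_compute_distant_patches at hpre
  unfold Spec_compute_distant_patches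
  simp only [compute_distant_patches, compute_distant_patches_alt]
  rcases lt_trichotomy W 0 with hW | hW | hW
  · -- W < 0: both return []
    rw [if_pos (Or.inr (le_of_lt hW))]
    rw [PySem.List.pyRange_one_eq_nil (le_of_lt hW)]
    simp only [List.foldl_nil]
    exact foldl_fixed_nil _
  · exact absurd hW hpre
  · by_cases hH : H ≤ 0
    · -- H ≤ 0: both return []
      
      rw [if_pos (Or.inl hH), PySem.List.pyRange_one_eq_nil hH]
      simp only [List.foldl_nil]
    · -- main case 0 < H, 0 < W
      rw [if_neg (by omega)]
      simp only [foldl_if_append, foldl_append_blocks, List.nil_append]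
      have hn : ((H.toNat : Int)) = H := Int.toNat_of_nonneg (by omega)
      have hmain := flat_eq_filter W (PySem.Int.floordiv patch_idx W) (PySem.Int.mod patch_idx W) m hW H.toNat
      rw [hn] at hmain
      rw [hmain]
      refine (List.filter_congr ?_)
      intro i hi
      rw [PySem.List.mem_pyRange_one] at hi
      exact (pred_agree patch_idx H W m i hW hi.1 hi.2).symm
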